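-- pv_equiv track=rewrite | github.com/NoelKi/satlink-threatguard | src/library.py | find_continuous_sequences_01
-- ===== SOURCE A (Python) =====
-- def find_continuous_sequences_01(list):
--     """
--     This funciton checks continuity of values in a list and returns in case the first and last
--     value of the continity stored in a list. Also works for multiple series of continity.
--
--     :param list: list of digits
--     :type list: list
--     :return sequences: list of beginning and end position of continity series in committed list.
--     :rtype: list[tuple]
--     """
--     sequences = []
--     if len(list) == 0:
--         return sequences
--     else:
--         current_sequence = [list[0]]
--
--         for i in range(1, len(list)):
--             if list[i] == list[i - 1] + 1:
--                 current_sequence.append(list[i])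
--             else:
--                 if len(current_sequence) > 1:
--                     sequences.append((current_sequence[0], current_sequence[-1]))
--                 current_sequence = [list[i]]
--
--         if len(current_sequence) > 1:                                           # check if last sequence is included
--             sequences.append((current_sequence[0], current_sequence[-1]))
--
--     return sequences
-- ===== SOURCE B (Python) =====
-- from itertools import groupby
--
-- def find_continuous_sequences_01(list):
--     sequences = []
--     for _, group in groupby(enumerate(list), key=lambda p: p[1] - p[0]):
--         values = [v for _, v in group]
--         if len(values) > 1:
--             sequences.append((values[0], values[-1]))
--     return sequences
-- ===== Notes on version B (the rewrite author's own statement) =====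
-- stated objective: idiomatic
-- what changed: Replaces the manual previous-element loop with its stateful current_sequence buffer by grouping enumerate(list) on the invariant key value-index with itertools.groupby and emitting (first, last) of each multi-element group.
import Mathlib
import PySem

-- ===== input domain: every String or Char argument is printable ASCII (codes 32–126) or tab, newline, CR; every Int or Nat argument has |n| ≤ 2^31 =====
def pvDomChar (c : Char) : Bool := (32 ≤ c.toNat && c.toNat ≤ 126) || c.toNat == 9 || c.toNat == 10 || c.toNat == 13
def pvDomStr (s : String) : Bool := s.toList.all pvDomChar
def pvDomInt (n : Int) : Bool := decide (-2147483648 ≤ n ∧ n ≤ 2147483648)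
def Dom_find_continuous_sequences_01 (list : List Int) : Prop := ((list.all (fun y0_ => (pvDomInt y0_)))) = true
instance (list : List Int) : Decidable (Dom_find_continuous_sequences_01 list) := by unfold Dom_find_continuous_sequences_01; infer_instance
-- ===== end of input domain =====

-- B replaces A's manual previous-element loop with grouping on the invariant key value-index
-- (itertools.groupby) and emitting (first, last) of each multi-element run; idiomatic, same cost.


-- ===== PORT A =====
-- 'if len(current_sequence) > 1: sequences.append((current_sequence[0], current_sequence[-1]))'
def pvFinal (st : List (Int × Int) × List Int) : List (Int × Int) :=
  if st.2.length > 1 then st.1 ++ [(st.2.headI, st.2.getLast!)] else st.1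

-- loop body of A's for-loop: state (sequences, current_sequence), index i; list[i] via pyGetD (always in range)
def pvStepA (l : List Int) (st : List (Int × Int) × List Int) (i : Int) : List (Int × Int) × List Int :=
  if PySem.List.pyGetD l i 0 = PySem.List.pyGetD l (i - 1) 0 + 1 then
    (st.1, st.2 ++ [PySem.List.pyGetD l i 0])
  else
    (pvFinal st, [PySem.List.pyGetD l i 0])

def find_continuous_sequences_01 (list : List Int) : List (Int × Int) :=
  if list.length = 0 then []
  else
    pvFinal ((PySem.List.pyRange 1 (list.length : Int) 1).foldl (pvStepA list)
      ([], [PySem.List.pyGetD list 0 0]))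

-- ===== PORT B =====
-- groupby(enumerate(list), key = value - index): a group continues exactly while each value is prev + 1.
-- pvTakeRun p xs = (rest of the current group after an element p, remaining list);
-- pvRuns splits the list into the groups' value lists.
def pvTakeRun (p : Int) : List Int → List Int × List Int
  | [] => ([], [])
  | y :: ys =>
    if y = p + 1 then
      let r := pvTakeRun y ys
      (y :: r.1, r.2)
    else ([], y :: ys)

theorem pvTakeRun_snd_le (p : Int) (xs : List Int) : (pvTakeRun p xs).2.length ≤ xs.length := by
  induction xs generalizing p with
  | nil => simp [pvTakeRun]
  | cons y ys ih =>
    simp only [pvTakeRun]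
    split
    · exact le_trans (ih y) (by simp)
    · simp

def pvRuns : List Int → List (List Int)
  | [] => []
  | x :: xs =>
    let r := pvTakeRun x xs
    (x :: r.1) :: pvRuns r.2
termination_by l => l.length
decreasing_by
  have := pvTakeRun_snd_le x xs
  simp_all

def find_continuous_sequences_01_alt (list : List Int) : List (Int × Int) :=
  (pvRuns list).foldl
    (fun sequences values =>
      if values.length > 1 then sequences ++ [(values.headI, values.getLast!)] else sequences)
    []

-- ===== PRECONDITION & SPEC =====
def Spec_find_continuous_sequences_01 (list : List Int) (out : List (Int × Int)) : Prop := out = find_continuous_sequences_01_alt list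
instance (list : List Int) (out : List (Int × Int)) : Decidable (Spec_find_continuous_sequences_01 list out) := by unfold Spec_find_continuous_sequences_01; infer_instance

-- ===== CLAIM (what is proved, stated in full; the proofs are below) =====
def Claim_equal_find_continuous_sequences_01 : Prop := ∀ (list : List Int), Dom_find_continuous_sequences_01 list → Spec_find_continuous_sequences_01 list (find_continuous_sequences_01 list)

-- ===== LEMMAS AND PROOFS =====

-- A's loop re-expressed as structural recursion over (previous element, remaining elements)
def pvPairFold : Int → List Int → List (Int × Int) × List Int → List (Int × Int) × List Int
  | _, [], st => st
  | p, y :: ys, st =>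
    pvPairFold y ys
      (if y = p + 1 then (st.1, st.2 ++ [y]) else (pvFinal st, [y]))

def pvEmit (c : List Int) : List (Int × Int) :=
  if c.length > 1 then [(c.headI, c.getLast!)] else []

def pvFlat (l : List Int) : List (Int × Int) := (pvRuns l).flatMap pvEmit

theorem pyGetD_cons_pos (x : Int) (xs : List Int) (i : Int) (h : 1 ≤ i) :
    PySem.List.pyGetD (x :: xs) i 0 = PySem.List.pyGetD xs (i - 1) 0 := by
  have hn : i = (((i - 1).toNat : Nat) : Int) + 1 := by omega
  have h2 : i - 1 = (((i - 1).toNat : Nat) : Int) := by omega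
  rw [hn, h2]
  simp [PySem.List.pyGetD, PySem.List.pyGet?_cons_succ]

theorem pvFinal_eq (s : List (Int × Int)) (c : List Int) : pvFinal (s, c) = s ++ pvEmit c := by
  unfold pvFinal pvEmit
  split <;> simp

theorem foldl_mem_congr {α β : Type} (l : List β) (f g : α → β → α) (a : α)
    (h : ∀ acc x, x ∈ l → f acc x = g acc x) : l.foldl f a = l.foldl g a := by
  induction l generalizing a with
  | nil => rfl
  | cons y ys ih =>
    simp only [List.foldl_cons]
    rw [h a y (by simp)]
    exact ih _ (fun acc x hx => h acc x (by simp [hx]))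

theorem stepA_shift (x : Int) (l : List Int) (st : List (Int × Int) × List Int) (i : Int)
    (h : 1 ≤ i) : pvStepA (x :: l) st (i + 1) = pvStepA l st i := by
  unfold pvStepA
  rw [show i + 1 - 1 = i by ring,
      pyGetD_cons_pos x l (i + 1) (by omega), pyGetD_cons_pos x l i h,
      show i + 1 - 1 = i by ring]

theorem fold_eq_pairFold (rest : List Int) (x : Int) (st : List (Int × Int) × List Int) :
    (PySem.List.pyRange 1 ((x :: rest).length : Int) 1).foldl (pvStepA (x :: rest)) st
      = pvPairFold x rest st := by
  induction rest generalizing x st with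
  | nil =>
    rw [show (([x] : List Int).length : Int) = 1 by simp]
    rw [PySem.List.pyRange_one_eq_nil (by omega)]
    rfl
  | cons y ys ih =>
    have hlen : (((x :: y :: ys).length : Nat) : Int) = (ys.length : Int) + 2 := by
      simp; omega
    rw [hlen, PySem.List.pyRange_one_cons (by omega), List.foldl_cons]
    have hstep : pvStepA (x :: y :: ys) st 1
        = (if y = x + 1 then (st.1, st.2 ++ [y]) else (pvFinal st, [y])) := by
      unfold pvStepA
      rw [pyGetD_cons_pos x (y :: ys) 1 le_rfl]
      norm_num [PySem.List.pyGetD_zero_cons]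
    have hrng : PySem.List.pyRange 2 ((ys.length : Int) + 2) 1
        = (PySem.List.pyRange 1 ((ys.length : Int) + 1) 1).map (· + 1) := by
      rw [PySem.List.pyRange_one, PySem.List.pyRange_one, List.map_map]
      have : ((ys.length : Int) + 2 - 2).toNat = ((ys.length : Int) + 1 - 1).toNat := by omega
      rw [this]
      exact List.map_congr_left (fun k _ => by simp; ring)
    rw [hstep, show (1:Int) + 1 = 2 by norm_num, hrng, List.foldl_map]
    rw [foldl_mem_congr _ _ (pvStepA (y :: ys)) _
      (fun acc i hi => stepA_shift x (y :: ys) acc i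
        ((PySem.List.mem_pyRange_one).mp hi).1)]
    have := ih y (if y = x + 1 then (st.1, st.2 ++ [y]) else (pvFinal st, [y]))
    rw [show (((y :: ys).length : Nat) : Int) = (ys.length : Int) + 1 by simp] at this
    rw [this]
    rfl

theorem pairFold_eq_flat (rest : List Int) (p : Int) (seqs : List (Int × Int)) (cur : List Int) :
    pvFinal (pvPairFold p rest (seqs, cur))
      = seqs ++ pvEmit (cur ++ (pvTakeRun p rest).1) ++ pvFlat ((pvTakeRun p rest).2) := by
  induction rest generalizing p seqs cur with
  | nil => simp [pvPairFold, pvTakeRun, pvFlat, pvRuns, pvFinal_eq]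
  | cons y ys ih =>
    show pvFinal (pvPairFold y ys
        (if y = p + 1 then (seqs, cur ++ [y]) else (pvFinal (seqs, cur), [y]))) = _
    by_cases h : y = p + 1
    · rw [if_pos h, ih]
      simp [pvTakeRun, h]
    · rw [if_neg h, ih, pvFinal_eq]
      rw [show pvTakeRun p (y :: ys) = ([], y :: ys) by simp [pvTakeRun, h]]
      conv_rhs => rw [pvFlat, pvRuns]
      simp [pvFlat]
theorem foldl_emit (runs : List (List Int)) (acc : List (Int × Int)) :
    runs.foldl
      (fun sequences values =>
        if values.length > 1 then sequences ++ [(values.headI, values.getLast!)] else sequences)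
      acc = acc ++ runs.flatMap pvEmit := by
  induction runs generalizing acc with
  | nil => simp
  | cons g gs ih =>
    simp only [List.foldl_cons, List.flatMap_cons, ih, pvEmit]
    split <;> simp

theorem alt_eq_flat (l : List Int) : find_continuous_sequences_01_alt l = pvFlat l := by
  unfold find_continuous_sequences_01_alt pvFlat
  rw [foldl_emit]
  simp

-- ===== VERDICT (by name: the statement is the Claim_ definition above) =====
theorem find_continuous_sequences_01_spec : Claim_equal_find_continuous_sequences_01 := by
  intro l _
  unfold Spec_find_continuous_sequences_01
  rw [alt_eq_flat]
  cases l with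
  | nil => rw [find_continuous_sequences_01, pvFlat, pvRuns]; rfl
  | cons x rest =>
    unfold find_continuous_sequences_01
    rw [if_neg (by simp), PySem.List.pyGetD_zero_cons, fold_eq_pairFold, pairFold_eq_flat]
    conv_rhs => rw [pvFlat, pvRuns]
    simp [pvFlat, pvEmit]
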